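-- pv_equiv track=rewrite | github.com/propertyfunder/Office-Lead-Scraper | src/enricher.py | _role_priority
-- ===== SOURCE A (Python) =====
-- def _role_priority(title: str) -> int:
--     if not title:
--         return 99
--     title_lower = title.lower()
--     priority_tiers = [
--         (1, ['founder', 'co-founder', 'owner', 'managing director', 'ceo', 'principal', 'proprietor']),
--         (2, ['director', 'partner', 'clinical director', 'practice owner', 'practice lead', 'practice manager']),
--         (3, ['lead therapist', 'head therapist', 'senior therapist', 'lead physiotherapist', 'head of']),
--         (4, ['consultant', 'specialist', 'senior']),
--         (5, ['physiotherapist', 'osteopath', 'chiropractor', 'therapist', 'practitioner', 'clinician']),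
--         (6, ['coach', 'instructor', 'teacher']),
--     ]
--     for priority, keywords in priority_tiers:
--         if any(kw in title_lower for kw in keywords):
--             return priority
--     return 99
-- ===== SOURCE B (Python) =====
-- _KW = [
--     ('founder', 1), ('co-founder', 1), ('owner', 1), ('managing director', 1),
--     ('ceo', 1), ('principal', 1), ('proprietor', 1),
--     ('director', 2), ('partner', 2), ('clinical director', 2), ('practice owner', 2),
--     ('practice lead', 2), ('practice manager', 2),
--     ('lead therapist', 3), ('head therapist', 3), ('senior therapist', 3),
--     ('lead physiotherapist', 3), ('head of', 3),
--     ('consultant', 4), ('specialist', 4), ('senior', 4),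
--     ('physiotherapist', 5), ('osteopath', 5), ('chiropractor', 5), ('therapist', 5),
--     ('practitioner', 5), ('clinician', 5),
--     ('coach', 6), ('instructor', 6), ('teacher', 6),
-- ]
--
--
-- def _role_priority(title: str) -> int:
--     if not title:
--         return 99
--     t = title.lower()
--     best = 99
--     for i in range(len(t)):
--         for kw, p in _KW:
--             if t.startswith(kw, i):
--                 best = min(best, p)
--     return best
-- ===== Notes on version B (the rewrite author's own statement) =====
-- stated objective: alternative
-- what changed: Replaces the tier-by-tier early-return scan using Python substring containment with a single left-to-right sweep over the positions of the lowered title, testing each keyword as a prefix at that position (naive multi-pattern matching) and keeping a running minimum priority; correct because a keyword occurs as a substring iff it is a prefix at some position, and tiers are in ascending priority order so the first matching tier equals the minimum matching priority.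
import Mathlib
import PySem

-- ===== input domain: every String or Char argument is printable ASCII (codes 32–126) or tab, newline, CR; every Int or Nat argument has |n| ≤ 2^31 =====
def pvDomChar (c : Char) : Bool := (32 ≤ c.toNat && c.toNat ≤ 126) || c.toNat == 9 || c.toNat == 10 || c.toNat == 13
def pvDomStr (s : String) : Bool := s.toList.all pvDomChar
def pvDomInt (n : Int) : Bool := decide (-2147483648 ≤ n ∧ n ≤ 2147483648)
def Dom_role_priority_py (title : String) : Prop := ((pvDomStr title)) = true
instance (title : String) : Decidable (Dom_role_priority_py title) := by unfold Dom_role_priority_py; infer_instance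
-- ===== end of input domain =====

-- B replaces A's tiered early-return substring scan by a single left-to-right sweep over the
-- title's positions, testing each keyword as a prefix there and keeping a running minimum
-- priority (objective: alternative, same cost).


-- ===== PORT A =====
def pvTiers : List (Int × List String) :=
  [ (1, ["founder", "co-founder", "owner", "managing director", "ceo", "principal", "proprietor"]),
    (2, ["director", "partner", "clinical director", "practice owner", "practice lead", "practice manager"]),
    (3, ["lead therapist", "head therapist", "senior therapist", "lead physiotherapist", "head of"]),
    (4, ["consultant", "specialist", "senior"]),
    (5, ["physiotherapist", "osteopath", "chiropractor", "therapist", "practitioner", "clinician"]),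
    (6, ["coach", "instructor", "teacher"]) ]

-- the 'for priority, keywords in priority_tiers: if any(...): return priority' loop
def pvScanTiers (t : String) : List (Int × List String) → Int
  | [] => 99
  | (p, kws) :: rest =>
      if kws.any (fun kw => PySem.Str.isIn kw t) then p else pvScanTiers t rest

def role_priority_py (title : String) : Int :=
  if title = "" then 99
  else pvScanTiers (PySem.Str.lower title) pvTiers

-- ===== PORT B =====
def pvKw : List (String × Int) :=
  [ ("founder", 1), ("co-founder", 1), ("owner", 1), ("managing director", 1),
    ("ceo", 1), ("principal", 1), ("proprietor", 1),
    ("director", 2), ("partner", 2), ("clinical director", 2), ("practice owner", 2),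
    ("practice lead", 2), ("practice manager", 2),
    ("lead therapist", 3), ("head therapist", 3), ("senior therapist", 3),
    ("lead physiotherapist", 3), ("head of", 3),
    ("consultant", 4), ("specialist", 4), ("senior", 4),
    ("physiotherapist", 5), ("osteopath", 5), ("chiropractor", 5), ("therapist", 5),
    ("practitioner", 5), ("clinician", 5),
    ("coach", 6), ("instructor", 6), ("teacher", 6) ]

-- the B loop: for i in range(len(t)): for kw, p in _KW: if t.startswith(kw, i): best = min(best, p)
def pvSweep (t : List Char) : Int :=
  (List.range t.length).foldl
    (fun best i =>
      pvKw.foldl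
        (fun b pk => if PySem.Chars.startswith (t.drop i) pk.1.toList then min b pk.2 else b)
        best)
    99

def role_priority_py_alt (title : String) : Int :=
  if title = "" then 99
  else pvSweep (PySem.Str.lower title).toList

-- ===== PRECONDITION & SPEC =====
def Spec_role_priority_py (title : String) (out : Int) : Prop := out = role_priority_py_alt title
instance (title : String) (out : Int) : Decidable (Spec_role_priority_py title out) := by unfold Spec_role_priority_py; infer_instance

-- ===== CLAIM (what is proved, stated in full; the proofs are below) =====
def Claim_equal_role_priority_py : Prop := ∀ (title : String), Dom_role_priority_py title → Spec_role_priority_py title (role_priority_py title)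

-- ===== LEMMAS AND PROOFS =====

-- generic facts about foldl min on Int
lemma pv_fmin_le_init (l : List Int) (b : Int) : l.foldl min b ≤ b := by
  induction l generalizing b with
  | nil => exact le_refl b
  | cons a l ih => exact le_trans (ih (min b a)) (min_le_left b a)

lemma pv_fmin_le_mem (l : List Int) (b x : Int) (hx : x ∈ l) : l.foldl min b ≤ x := by
  induction l generalizing b with
  | nil => cases hx
  | cons a l ih =>
      rcases List.mem_cons.1 hx with rfl | h
      · exact le_trans (pv_fmin_le_init l (min b x)) (min_le_right b x)
      · exact ih (min b a) h

lemma pv_fmin_cases (l : List Int) (b : Int) : l.foldl min b = b ∨ l.foldl min b ∈ l := by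
  induction l generalizing b with
  | nil => exact Or.inl rfl
  | cons a l ih =>
      rcases ih (min b a) with h | h
      · rcases min_choice b a with hb | ha
        · exact Or.inl (by simpa [hb] using h)
        · refine Or.inr ?_
          rw [List.foldl_cons, h, ha]
          simp
      · exact Or.inr (List.mem_cons_of_mem a h)

lemma pv_fmin_lb (l : List Int) (b p : Int) (hb : p ≤ b) (hl : ∀ x ∈ l, p ≤ x) :
    p ≤ l.foldl min b := by
  induction l generalizing b with
  | nil => exact hb
  | cons a l ih =>
      exact ih (min b a) (le_min hb (hl a (by simp)))
        (fun x hx => hl x (List.mem_cons_of_mem a hx))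

lemma pv_fmin_ext (l1 l2 : List Int) (b : Int) (h : ∀ x, x ∈ l1 ↔ x ∈ l2) :
    l1.foldl min b = l2.foldl min b := by
  apply le_antisymm
  · rcases pv_fmin_cases l2 b with h2 | h2
    · rw [h2]; exact pv_fmin_le_init l1 b
    · exact pv_fmin_le_mem l1 b _ ((h _).2 h2)
  · rcases pv_fmin_cases l1 b with h1 | h1
    · rw [h1]; exact pv_fmin_le_init l2 b
    · exact pv_fmin_le_mem l2 b _ ((h _).1 h1)

lemma pv_fmin_eq_of (l : List Int) (b p : Int) (hmem : p ∈ l) (hmin : ∀ x ∈ l, p ≤ x)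
    (hb : p ≤ b) : l.foldl min b = p :=
  le_antisymm (pv_fmin_le_mem l b p hmem) (pv_fmin_lb l b p hb hmin)

-- B's inner loop is a min-fold over the priorities of the keywords matching at position i
lemma pv_inner_fold (c : String × Int → Bool) (l : List (String × Int)) (b : Int) :
    l.foldl (fun b pk => if c pk then min b pk.2 else b) b
      = ((l.filter c).map (·.2)).foldl min b := by
  induction l generalizing b with
  | nil => rfl
  | cons a l ih =>
      by_cases h : c a = true
      · simp only [List.foldl_cons, List.filter_cons, h, if_true, List.map_cons,
          List.foldl_cons]
        exact ih (min b a.2)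
      · simp only [List.foldl_cons, List.filter_cons, h, if_false, Bool.false_eq_true]
        exact ih b

-- B's outer loop flattens into one min-fold
lemma pv_outer_fold (f : Nat → List Int) (I : List Nat) (b : Int) :
    I.foldl (fun b i => (f i).foldl min b) b = (I.flatMap f).foldl min b := by
  induction I generalizing b with
  | nil => rfl
  | cons i I ih =>
      simp only [List.foldl_cons, List.flatMap_cons, List.foldl_append]
      exact ih ((f i).foldl min b)

-- flatten the tier table into (keyword, priority) pairs
def pvFlat (tiers : List (Int × List String)) : List (String × Int) :=
  tiers.flatMap (fun e => e.2.map (fun kw => (kw, e.1)))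

lemma pvKw_eq_flat : pvKw = pvFlat pvTiers := by decide

def pvMatched (t : String) (pairs : List (String × Int)) : List Int :=
  (pairs.filter (fun pk => PySem.Str.isIn pk.1 t)).map (·.2)

lemma pvMatched_block (t : String) (p : Int) (kws : List String) :
    pvMatched t (kws.map (fun kw => (kw, p)))
      = (kws.filter (fun kw => PySem.Str.isIn kw t)).map (fun _ => p) := by
  induction kws with
  | nil => rfl
  | cons k ks ih =>
      by_cases h : PySem.Str.isIn k t = true
      · simp only [pvMatched, List.map_cons, List.filter_cons, h, if_true,
          List.map_cons] at ih ⊢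
        exact congrArg (p :: ·) ih
      · simp only [pvMatched, List.map_cons, List.filter_cons, h, if_false,
          Bool.false_eq_true] at ih ⊢
        exact ih

lemma pvMatched_mem_flat (t : String) (tiers : List (Int × List String)) (x : Int)
    (hx : x ∈ pvMatched t (pvFlat tiers)) : ∃ e ∈ tiers, e.1 = x := by
  rcases List.mem_map.1 hx with ⟨pk, hpk, rfl⟩
  rcases List.mem_filter.1 hpk with ⟨hmem, -⟩
  rcases List.mem_flatMap.1 hmem with ⟨e, he, hin⟩
  rcases List.mem_map.1 hin with ⟨kw, -, rfl⟩
  exact ⟨e, he, rfl⟩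

-- A's early-return tier scan equals the min-fold over all matched priorities
lemma pvScan_eq_fmin (t : String) (tiers : List (Int × List String))
    (hord : List.Pairwise (fun a b => a.1 ≤ b.1) tiers)
    (h99 : ∀ e ∈ tiers, e.1 ≤ 99) :
    pvScanTiers t tiers = (pvMatched t (pvFlat tiers)).foldl min 99 := by
  induction tiers with
  | nil => rfl
  | cons e rest ih =>
      obtain ⟨p, kws⟩ := e
      have hflat : pvMatched t (pvFlat ((p, kws) :: rest))
          = pvMatched t (kws.map (fun kw => (kw, p))) ++ pvMatched t (pvFlat rest) := by
        simp [pvFlat, pvMatched, List.flatMap_cons, List.filter_append, List.map_append]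
      cases hany : kws.any (fun kw => PySem.Str.isIn kw t) with
      | true =>
        have hscan : pvScanTiers t ((p, kws) :: rest) = p := by
          simp only [pvScanTiers]; rw [if_pos hany]
        have hne : (kws.filter (fun kw => PySem.Str.isIn kw t)) ≠ [] := by
          rcases List.any_eq_true.1 hany with ⟨k, hk, hkt⟩
          intro hnil
          have hmem : k ∈ List.filter (fun kw => PySem.Str.isIn kw t) kws :=
            List.mem_filter.2 ⟨hk, hkt⟩
          rw [hnil] at hmem; simp at hmem
        rw [hscan, hflat, pvMatched_block]
        refine (pv_fmin_eq_of _ 99 p ?_ ?_ (h99 (p, kws) (by simp))).symm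
        · rcases List.exists_mem_of_ne_nil _ hne with ⟨k, hk⟩
          exact List.mem_append_left _ (List.mem_map.2 ⟨k, hk, rfl⟩)
        · intro x hx
          rcases List.mem_append.1 hx with h | h
          · rcases List.mem_map.1 h with ⟨a, -, rfl⟩; exact le_refl _
          · rcases pvMatched_mem_flat t rest x h with ⟨e, he, rfl⟩
            exact (List.pairwise_cons.1 hord).1 e he
      | false =>
        have hnil : pvMatched t (kws.map (fun kw => (kw, p))) = [] := by
          rw [pvMatched_block]
          simp only [List.map_eq_nil_iff, List.filter_eq_nil_iff]
          intro k hk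
          simpa using List.any_eq_false.1 hany k hk
        have hscan : pvScanTiers t ((p, kws) :: rest) = pvScanTiers t rest := by
          have hne : ¬((kws.any fun kw => PySem.Str.isIn kw t) = true) := by
            rw [hany]; exact Bool.false_ne_true
          simp only [pvScanTiers]; rw [if_neg hne]
        rw [hscan, hflat, hnil, List.nil_append]
        exact ih (List.pairwise_cons.1 hord).2
          (fun e he => h99 e (List.mem_cons_of_mem _ he))

lemma pvKw_ne_nil : ∀ pk ∈ pvKw, pk.1.toList ≠ [] := by decide

-- a nonempty keyword occurs as a substring iff it is a prefix at some in-range position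
lemma pv_isIn_iff_pos (kw : String) (tl : List Char) (hkw : kw.toList ≠ []) :
    PySem.Chars.isIn kw.toList tl = true
      ↔ ∃ i ∈ List.range tl.length, PySem.Chars.startswith (tl.drop i) kw.toList = true := by
  rw [← PySem.Chars.exists_prefix_drop_iff_isIn]
  constructor
  · rintro ⟨j, hj⟩
    by_cases hjl : j < tl.length
    · exact ⟨j, List.mem_range.2 hjl, (PySem.Chars.startswith_iff _ _).2 hj⟩
    · exfalso
      have : tl.drop j = [] := List.drop_eq_nil_of_le (le_of_not_gt hjl)
      rw [this] at hj
      exact hkw (List.prefix_nil.1 hj)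
  · rintro ⟨i, -, hi⟩
    exact ⟨i, (PySem.Chars.startswith_iff _ _).1 hi⟩

-- ===== VERDICT (by name: the statement is the Claim_ definition above) =====
theorem role_priority_py_spec : Claim_equal_role_priority_py := by
  intro title _
  unfold Spec_role_priority_py role_priority_py role_priority_py_alt
  by_cases h : title = ""
  · simp [h]
  · rw [if_neg h, if_neg h]
    set t := PySem.Str.lower title with ht
    set tl := t.toList with htl
    unfold pvSweep
    have hstep : (fun (best : Int) (i : Nat) =>
        pvKw.foldl (fun b pk =>
          if PySem.Chars.startswith (tl.drop i) pk.1.toList then min b pk.2 else b) best)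
        = (fun best i =>
            (((pvKw.filter (fun pk => PySem.Chars.startswith (tl.drop i) pk.1.toList)).map
              (·.2))).foldl min best) := by
      funext best i
      exact pv_inner_fold _ pvKw best
    rw [hstep, pv_outer_fold, pvScan_eq_fmin t pvTiers (by decide) (by decide), ← pvKw_eq_flat]
    apply pv_fmin_ext
    intro x
    constructor
    · intro hx
      rcases List.mem_map.1 hx with ⟨pk, hpk, rfl⟩
      rcases List.mem_filter.1 hpk with ⟨hmem, hcond⟩
      have hIn : PySem.Chars.isIn pk.1.toList tl = true := by
        simpa using hcond
      rcases (pv_isIn_iff_pos pk.1 tl (pvKw_ne_nil pk hmem)).1 hIn with ⟨i, hi, hsw⟩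
      refine List.mem_flatMap.2 ⟨i, hi, ?_⟩
      exact List.mem_map.2 ⟨pk, List.mem_filter.2 ⟨hmem, hsw⟩, rfl⟩
    · intro hx
      rcases List.mem_flatMap.1 hx with ⟨i, hi, hin⟩
      rcases List.mem_map.1 hin with ⟨pk, hpk, rfl⟩
      rcases List.mem_filter.1 hpk with ⟨hmem, hsw⟩
      refine List.mem_map.2 ⟨pk, List.mem_filter.2 ⟨hmem, ?_⟩, rfl⟩
      have : PySem.Chars.isIn pk.1.toList tl = true :=
        (pv_isIn_iff_pos pk.1 tl (pvKw_ne_nil pk hmem)).2 ⟨i, hi, hsw⟩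
      simpa using this
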